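-- pv_equiv track=rewrite | github.com/wogkr810/coding-test | 프로그래머스/lv3/12987. 숫자 게임/숫자 게임.py | solution
-- ===== SOURCE A (Python) =====
-- def solution(A, B):
--     A.sort()
--     B.sort()
--
--     from collections import deque
--     B = deque(B)
--
--     cnt = 0
--
--     for i in range(len(A)):
--         while B:
--             tmp = B.popleft()
--
--             if tmp > A[i]:
--                 cnt += 1
--                 break
--
--     return cnt
-- ===== SOURCE B (Python) =====
-- def solution(A, B):
--     A.sort()
--     B.sort()
--     cnt = 0
--     it = iter(reversed(B))
--     b = next(it, None)
--     for a in reversed(A):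
--         if b is not None and b > a:
--             cnt += 1
--             b = next(it, None)
--     return cnt
-- ===== Notes on version B (the rewrite author's own statement) =====
-- stated objective: simpler
-- what changed: Replaces the nested for/while deque-popping forward greedy with a single backward pass over both sorted lists from the largest elements, matching B's current largest card when it beats A's, with no deque and no inner loop.
import Mathlib
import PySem

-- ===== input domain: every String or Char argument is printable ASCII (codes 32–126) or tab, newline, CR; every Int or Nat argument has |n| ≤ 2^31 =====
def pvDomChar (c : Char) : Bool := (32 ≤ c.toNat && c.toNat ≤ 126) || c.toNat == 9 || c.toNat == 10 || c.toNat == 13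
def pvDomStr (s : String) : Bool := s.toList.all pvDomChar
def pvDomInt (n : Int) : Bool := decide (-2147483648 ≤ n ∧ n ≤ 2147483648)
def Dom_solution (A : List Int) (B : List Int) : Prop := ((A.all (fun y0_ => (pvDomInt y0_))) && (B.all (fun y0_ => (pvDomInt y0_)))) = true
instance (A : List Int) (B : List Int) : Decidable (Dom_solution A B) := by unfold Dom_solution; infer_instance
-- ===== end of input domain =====

-- B mutates its arguments in place with .sort() exactly like A; the theorems below are about the return value.
-- B replaces A's nested for/while deque-consuming forward greedy with a single backward pass over both
-- sorted lists from the largest elements (objective: simpler — no deque, no inner loop).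

-- ===== PORT A =====
-- the inner 'while B: tmp = B.popleft(); if tmp > A[i]: cnt += 1; break'
-- scan for the first popped element > a; some rest = matched (break), none = deque exhausted
def fScan (a : Int) : List Int → Option (List Int)
  | [] => none
  | b :: bs => if b > a then some bs else fScan a bs

-- the outer 'for i in range(len(A))' loop over the sorted A with the deque and cnt as state
def fLoop : List Int → List Int → Int → Int
  | [], _, cnt => cnt
  | a :: as_, bs, cnt =>
    match fScan a bs with
    | some bs' => fLoop as_ bs' (cnt + 1)
    | none => fLoop as_ [] cnt

def solution (A : List Int) (B : List Int) : Int :=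
  fLoop (PySem.List.sorted A (fun x => x) false) (PySem.List.sorted B (fun x => x) false) 0

-- ===== PORT B =====
-- 'for a in reversed(A): if b is not None and b > a: cnt += 1; b = next(it, None)'
-- the iterator over reversed(B) is the descending list consumed head-first: b = head, rest = tail
def gLoop : List Int → List Int → Int → Int
  | [], _, cnt => cnt
  | a :: ras, rb, cnt =>
    match rb with
    | b :: rb' => if b > a then gLoop ras rb' (cnt + 1) else gLoop ras rb cnt
    | [] => gLoop ras rb cnt

def solution_alt (A : List Int) (B : List Int) : Int :=
  gLoop (PySem.List.sorted A (fun x => x) false).reverse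
        (PySem.List.sorted B (fun x => x) false).reverse 0

-- ===== PRECONDITION & SPEC =====
def Spec_solution (A : List Int) (B : List Int) (out : Int) : Prop := out = solution_alt A B
instance (A : List Int) (B : List Int) (out : Int) : Decidable (Spec_solution A B out) := by unfold Spec_solution; infer_instance

-- ===== CLAIM (what is proved, stated in full; the proofs are below) =====
def Claim_equal_solution : Prop := ∀ (A : List Int) (B : List Int), Dom_solution A B → Spec_solution A B (solution A B)

-- ===== LEMMAS AND PROOFS =====

theorem fLoop_nil_b : ∀ (as_ : List Int) (c : Int), fLoop as_ [] c = c := by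
  intro as_
  induction as_ with
  | nil => intro c; rfl
  | cons a t ih => intro c; simp [fLoop, fScan, ih]

theorem fScan_none_of_le (a : Int) : ∀ (bs : List Int), (∀ x ∈ bs, x ≤ a) → fScan a bs = none := by
  intro bs
  induction bs with
  | nil => intro _; rfl
  | cons b t ih =>
    intro h
    have hb : b ≤ a := h b (by simp)
    simp only [fScan, if_neg (by omega : ¬ b > a)]
    exact ih (fun x hx => h x (by simp [hx]))

theorem fScan_some_subset (a : Int) : ∀ (bs R : List Int), fScan a bs = some R → ∀ x ∈ R, x ∈ bs := by
  intro bs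
  induction bs with
  | nil => intro R h; simp [fScan] at h
  | cons b t ih =>
    intro R h x hx
    by_cases hb : b > a
    · simp only [fScan, if_pos hb, Option.some.injEq] at h
      subst h; simp [hx]
    · simp only [fScan, if_neg hb] at h
      exact List.mem_cons_of_mem _ (ih R h x hx)

theorem fScan_append (a : Int) : ∀ (l m : List Int),
    fScan a (l ++ m) = match fScan a l with
      | some R => some (R ++ m)
      | none => fScan a m := by
  intro l m
  induction l with
  | nil => simp [fScan]
  | cons b t ih =>
    by_cases hb : b > a
    · simp [fScan, if_pos hb]
    · simp [fScan, if_neg hb, ih]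

-- appending at the end of A an element ≥ everything left in the deque adds no win
theorem fLoop_append_big : ∀ (as_ bs : List Int) (a c : Int), (∀ x ∈ bs, x ≤ a) →
    fLoop (as_ ++ [a]) bs c = fLoop as_ bs c := by
  intro as_
  induction as_ with
  | nil =>
    intro bs a c h
    simp [fLoop, fScan_none_of_le a bs h]
  | cons a1 t ih =>
    intro bs a c h
    simp only [List.cons_append, fLoop]
    cases hs : fScan a1 bs with
    | none => simp [ih [] a (c) (by simp)]
    | some R =>
      exact ih R a (c + 1) (fun x hx => h x (fScan_some_subset a1 bs R hs x hx))

-- appending a to A and b to B, with b > a dominating everything, adds exactly one win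
theorem fLoop_append_pair : ∀ (as_ bs : List Int) (a b c : Int), b > a →
    (∀ x ∈ as_, x ≤ a) → (∀ x ∈ bs, x ≤ b) →
    fLoop (as_ ++ [a]) (bs ++ [b]) c = fLoop as_ bs (c + 1) := by
  intro as_
  induction as_ with
  | nil =>
    intro bs a b c hba _ _
    simp only [List.nil_append, fLoop, fScan_append]
    cases hs : fScan a bs with
    | some R => simp
    | none => simp [fScan, if_pos hba]
  | cons a1 t ih =>
    intro bs a b c hba ha hb
    have ha1 : a1 ≤ a := ha a1 (by simp)
    simp only [List.cons_append, fLoop, fScan_append]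
    cases hs : fScan a1 bs with
    | some R =>
      dsimp only
      rw [ih R a b (c + 1) hba (fun x hx => ha x (by simp [hx]))
            (fun x hx => hb x (fScan_some_subset a1 bs R hs x hx))]
    | none =>
      simp only [fScan, if_pos (by omega : b > a1), fLoop_nil_b]

-- the backward pass over the reversed sorted lists computes the forward greedy's count
theorem gLoop_eq_fLoop : ∀ (ras rbs : List Int) (c : Int),
    ras.Pairwise (· ≥ ·) → rbs.Pairwise (· ≥ ·) →
    gLoop ras rbs c = fLoop ras.reverse rbs.reverse c := by
  intro ras
  induction ras with
  | nil => intro rbs c _ _; rfl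
  | cons a t ih =>
    intro rbs c ha hb
    have ha' : ∀ x ∈ t, x ≤ a := by
      intro x hx; exact List.rel_of_pairwise_cons ha hx
    have hat : t.Pairwise (· ≥ ·) := ha.of_cons
    cases rbs with
    | nil =>
      simp only [gLoop, List.reverse_nil]
      rw [ih [] c hat (by simp)]
      simp [fLoop_nil_b]
    | cons b rb' =>
      have hb' : ∀ x ∈ rb', x ≤ b := by
        intro x hx; exact List.rel_of_pairwise_cons hb hx
      have hbt : rb'.Pairwise (· ≥ ·) := hb.of_cons
      simp only [gLoop, List.reverse_cons]
      by_cases hgt : b > a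
      · rw [if_pos hgt, ih rb' (c + 1) hat hbt,
            fLoop_append_pair t.reverse rb'.reverse a b c hgt
              (by intro x hx; exact ha' x (List.mem_reverse.mp hx))
              (by intro x hx; exact hb' x (List.mem_reverse.mp hx))]
      · rw [if_neg hgt, ih (b :: rb') c hat hb]
        simp only [List.reverse_cons]
        rw [fLoop_append_big t.reverse (rb'.reverse ++ [b]) a c
              (by intro x hx
                  rcases List.mem_append.mp hx with h | h
                  · have := hb' x (List.mem_reverse.mp h); omega
                  · simp at h; omega)]

-- ===== VERDICT (by name: the statement is the Claim_ definition above) =====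
theorem solution_spec : Claim_equal_solution := by
  intro A B _
  unfold Spec_solution solution solution_alt
  have hA : (PySem.List.sorted A (fun x => x) false).Pairwise (fun a b => a ≤ b) :=
    PySem.List.sorted_pairwise A (fun x => x)
  have hB : (PySem.List.sorted B (fun x => x) false).Pairwise (fun a b => a ≤ b) :=
    PySem.List.sorted_pairwise B (fun x => x)
  rw [gLoop_eq_fLoop _ _ 0 (List.pairwise_reverse.mpr (by simpa using hA))
        (List.pairwise_reverse.mpr (by simpa using hB)),
      List.reverse_reverse, List.reverse_reverse]
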